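-- pv_equiv track=rewrite | github.com/erick-panse/OPE-IndyCar | funilaria/forms.py | validarModelo
-- ===== SOURCE A (Python) =====
-- def validarModelo(modelo):
--     if not modelo:
--         return False
--     bloqueado = '!@#$%¨&*()_+`{}^:><|\,;~]´[=-"'
--     for i in bloqueado:
--         if i in modelo:
--             return False
--     return True
-- ===== SOURCE B (Python) =====
-- def validarModelo(modelo):
--     if not modelo:
--         return False
--     blocked = set('!@#$%¨&*()_+`{}^:><|\,;~]´[=-"')
--     return not any(c in blocked for c in modelo)
-- ===== Notes on version B (the rewrite author's own statement) =====
-- stated objective: idiomatic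
-- what changed: B scans the input string once, testing each character against a precomputed blocked-character set, instead of A's loop over the blocked characters each doing a substring search of the input.
import Mathlib
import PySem

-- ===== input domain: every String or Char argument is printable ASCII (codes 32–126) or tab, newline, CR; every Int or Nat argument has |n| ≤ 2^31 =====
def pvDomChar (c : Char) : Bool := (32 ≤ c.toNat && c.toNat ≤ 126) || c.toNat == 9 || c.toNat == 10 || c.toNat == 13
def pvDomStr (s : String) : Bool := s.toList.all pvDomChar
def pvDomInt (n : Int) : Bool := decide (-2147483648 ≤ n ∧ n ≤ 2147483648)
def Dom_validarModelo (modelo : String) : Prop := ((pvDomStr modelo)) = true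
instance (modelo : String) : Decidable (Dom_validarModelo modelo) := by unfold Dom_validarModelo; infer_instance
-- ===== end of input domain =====

-- B replaces A's loop over the blocked characters (each doing a substring search of the
-- input) with a single scan of the input against a blocked-character set; idiomatic, same result.

-- ===== PORT A =====
-- the for-loop over `bloqueado` with its early `return False`
def validarModeloLoop (modelo : String) : List Char → Bool
  | [] => true
  | i :: rest =>
      -- `i in modelo`: substring membership of the one-char string
      if PySem.Str.isIn (String.ofList [i]) modelo then false
      else validarModeloLoop modelo rest

def validarModelo (modelo : String) : Bool :=
  if modelo.toList.isEmpty then false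
  else validarModeloLoop modelo "!@#$%¨&*()_+`{}^:><|\\,;~]´[=-\"".toList

-- ===== PORT B =====
def validarModelo_alt (modelo : String) : Bool :=
  if modelo.toList.isEmpty then false
  else
    let blocked := PySem.Set.ofList "!@#$%¨&*()_+`{}^:><|\\,;~]´[=-\"".toList
    !(modelo.toList.any fun c => PySem.Set.contains blocked c)

-- ===== PRECONDITION & SPEC =====
def Spec_validarModelo (modelo : String) (out : Bool) : Prop := out = validarModelo_alt modelo
instance (modelo : String) (out : Bool) : Decidable (Spec_validarModelo modelo out) := by unfold Spec_validarModelo; infer_instance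

-- ===== CLAIM (what is proved, stated in full; the proofs are below) =====
def Claim_equal_validarModelo : Prop := ∀ (modelo : String), Dom_validarModelo modelo → Spec_validarModelo modelo (validarModelo modelo)

-- ===== LEMMAS AND PROOFS =====

-- a one-character string is 'in' s iff the character occurs in s
lemma isIn_singleton (i : Char) (s : String) :
    PySem.Str.isIn (String.ofList [i]) s = s.toList.contains i := by
  rw [Bool.eq_iff_iff, PySem.Str.isIn_iff_infix]
  simp only [String.toList_ofList]
  simp [List.singleton_infix_iff]

-- A's loop returns true iff no blocked character occurs in the input
lemma loop_eq_all (s : String) (bl : List Char) :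
    validarModeloLoop s bl = bl.all (fun i => !s.toList.contains i) := by
  induction bl with
  | nil => rfl
  | cons i rest ih =>
      simp only [validarModeloLoop, isIn_singleton, List.all_cons]
      by_cases h : s.toList.contains i = true <;> simp [ih]

-- swapping the two quantified scans
lemma all_not_eq_not_any (m bl : List Char) :
    bl.all (fun i => !m.contains i) = !(m.any fun c => bl.contains c) := by
  rw [Bool.eq_iff_iff]
  simp only [List.all_eq_true, Bool.not_eq_true', Bool.not_eq_true,
    List.any_eq_false, List.contains_eq_mem]
  constructor
  · intro h c hc; by_contra hb
    exact absurd (h c (by simpa using hb)) (by simpa [hc])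
  · intro h i hi; by_contra hb
    exact absurd (h i (by simpa [Bool.not_eq_false] using hb)) (by simpa [hi])

-- ===== VERDICT (by name: the statement is the Claim_ definition above) =====
theorem validarModelo_spec : Claim_equal_validarModelo := by
  intro modelo _
  unfold Spec_validarModelo validarModelo validarModelo_alt
  by_cases h : modelo.toList.isEmpty
  · simp [h]
  · simp only [h, if_neg, Bool.false_eq_true, not_false_eq_true]
    rw [loop_eq_all, all_not_eq_not_any]
    simp [PySem.Set.contains_eq_listContains, PySem.Set.mem_ofList]
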